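-- pv_equiv track=rewrite | github.com/kairos4213/note_assistant | src/note_assistant/note_assistant.py | update_and_format_file
-- ===== SOURCE A (Python) =====
-- def update_and_format_file(contents, note, subnotes):
--     """Returns formatted note with any provided subnotes to file"""
--     lines = contents.splitlines(keepends=True)
--
--     note_index = get_note_index(lines, note)
--     if note_index >= 0:
--         existing_subnotes = get_existing_subnotes(lines, note_index)
--         # Add input subnotes to existing subnote list
--         for subnote in subnotes:
--             existing_subnotes.append(subnote)
--
--         # Format and re-insert existing notes & input subnotes to lines
--         lines.insert(note_index + 1, format_subnotes(existing_subnotes))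
--
--     # Add new note as well as any input subnotes to lines in file contents
--     if note_index == -1:
--         formatted_subnotes = format_subnotes(subnotes)
--         formatted_note = format_note(note, formatted_subnotes)
--         lines.append(formatted_note)
--
--     # Rejoin lines and write to file
--     return "".join(lines)
--
-- def get_note_index(lines, note):
--     """Returns index note index if found, else -1"""
--     for i in range(len(lines)):
--         # If current line matches header (note):
--         if lines[i] == f"# {note}\n":
--             return i
--     return -1
--
-- def get_existing_subnotes(lines, note_index):
--     """Gets any existing subnotes under note and returns as list"""
--     existing_subnotes = []
--     subnote_index = note_index + 1
--
--     # Start while loop if line is a subnote -- move all existing subnotes to list in memory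
--     while subnote_index < len(lines) and lines[subnote_index].startswith("\t-"):
--         existing_subnotes.append(lines.pop(subnote_index))
--
--     return existing_subnotes
--
-- def format_subnotes(subnotes):
--     """Takes list of subnotes and returns a formatted string"""
--     formatted_subnotes_string = ""
--     if subnotes:
--         for subnote in subnotes:
--             if subnote.startswith("\t-"):
--                 formatted_subnotes_string += subnote
--             else:
--                 formatted_subnotes_string += f"\t- {subnote}\n"
--     return formatted_subnotes_string
--
-- def format_note(note, subnotes_string):
--     """Takes a note and formatted subnote string and returns formatted note"""
--     return f"# {note}\n" + subnotes_string
-- ===== SOURCE B (Python) =====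
-- def update_and_format_file(contents, note, subnotes):
--     """Returns formatted note with any provided subnotes to file"""
--     header = f"# {note}\n"
--     lines = contents.splitlines(keepends=True)
--     out = []
--     found = False
--     i = 0
--     while i < len(lines):
--         line = lines[i]
--         out.append(line)
--         i += 1
--         if not found and line == header:
--             found = True
--             run = []
--             while i < len(lines) and lines[i].startswith("\t-"):
--                 run.append(lines[i])
--                 i += 1
--             out.append(_format_subnotes(run + list(subnotes)))
--     if not found:
--         out.append(header + _format_subnotes(subnotes))
--     return "".join(out)
--
-- def _format_subnotes(subnotes):
--     return "".join(s if s.startswith("\t-") else f"\t- {s}\n" for s in subnotes)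
-- ===== Notes on version B (the rewrite author's own statement) =====
-- stated objective: alternative
-- what changed: Replaces A's multi-pass index arithmetic (find header index, pop existing subnote lines one-by-one by index, insert the formatted block back at index+1, conditional append) by a single streaming left-to-right pass over the split lines that copies lines and, at the first header match, absorbs the contiguous '\t-' run in place and emits the formatted block immediately, with a found flag deciding the trailing append.
import Mathlib
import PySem

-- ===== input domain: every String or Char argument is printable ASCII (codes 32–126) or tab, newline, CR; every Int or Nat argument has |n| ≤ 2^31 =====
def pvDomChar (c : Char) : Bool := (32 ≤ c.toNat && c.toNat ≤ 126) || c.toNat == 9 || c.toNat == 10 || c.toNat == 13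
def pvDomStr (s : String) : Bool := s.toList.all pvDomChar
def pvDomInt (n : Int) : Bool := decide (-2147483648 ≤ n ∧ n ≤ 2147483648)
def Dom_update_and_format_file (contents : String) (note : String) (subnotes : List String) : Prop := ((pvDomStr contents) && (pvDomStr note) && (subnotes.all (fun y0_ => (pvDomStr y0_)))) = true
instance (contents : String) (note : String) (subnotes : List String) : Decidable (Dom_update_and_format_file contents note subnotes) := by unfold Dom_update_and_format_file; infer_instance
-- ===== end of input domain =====

-- B replaces A's index-based find/pop/insert passes by one streaming pass with a found flag (objective: alternative decomposition, same cost class).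

-- Shared primitive: str.splitlines(keepends=True), exact on the Dom character set
-- (line boundaries there are exactly '\n', '\r\n' and '\r'; PySem has only the keepends=False form).
def pvSplitKeep : List Char → List Char → List (List Char)
  | [], acc => if acc = [] then [] else [acc.reverse]
  | '\n' :: rest, acc => (acc.reverse ++ ['\n']) :: pvSplitKeep rest []
  | '\r' :: '\n' :: rest, acc => (acc.reverse ++ ['\r', '\n']) :: pvSplitKeep rest []
  | '\r' :: rest, acc => (acc.reverse ++ ['\r']) :: pvSplitKeep rest []
  | c :: rest, acc => pvSplitKeep rest (c :: acc)

-- ===== PORT A =====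
-- format_subnotes (A's string-accumulator loop, with the `if subnotes:` guard)
def pvFsubA (subs : List (List Char)) : List Char :=
  if subs = [] then []
  else subs.foldl (fun acc s =>
    if PySem.Chars.startswith s ['\t', '-'] then acc ++ s
    else acc ++ ('\t' :: '-' :: ' ' :: s) ++ ['\n']) []

-- format_note
def pvFnoteA (note : List Char) (subsStr : List Char) : List Char :=
  ('#' :: ' ' :: note ++ ['\n']) ++ subsStr

-- get_note_index: the `for i in range(len(lines))` scan with running counter
def pvGniA (lines : List (List Char)) (header : List Char) (i : Nat) : Int :=
  match lines with
  | [] => -1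
  | l :: rest => if l = header then (i : Int) else pvGniA rest header (i + 1)

-- get_existing_subnotes: the `while … lines.pop(subnote_index)` loop (pop at a fixed index = eraseIdx)
def pvGesA (lines : List (List Char)) (idx : Nat) (acc : List (List Char)) :
    List (List Char) × List (List Char) :=
  if h : idx < lines.length then
    if PySem.Chars.startswith lines[idx] ['\t', '-'] then
      pvGesA (lines.eraseIdx idx) idx (acc ++ [lines[idx]])
    else (acc, lines)
  else (acc, lines)
  termination_by lines.length
  decreasing_by simp [List.length_eraseIdx_of_lt h]; omega

def update_and_format_file (contents : String) (note : String) (subnotes : List String) : String :=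
  let lines := pvSplitKeep contents.toList []
  let header := '#' :: ' ' :: note.toList ++ ['\n']
  let ni := pvGniA lines header 0
  -- note_index ≥ 0 branch (ni ≥ 0 guards the .toNat, so it is exact)
  let lines1 :=
    if 0 ≤ ni then
      let p := pvGesA lines (ni.toNat + 1) []
      let existing := subnotes.foldl (fun acc s => acc ++ [s.toList]) p.1
      PySem.List.insert p.2 (ni + 1) (pvFsubA existing)
    else lines
  -- note_index == -1 branch
  let lines2 :=
    if ni = -1 then lines1 ++ [pvFnoteA note.toList (pvFsubA (subnotes.map (·.toList)))]
    else lines1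
  String.ofList lines2.flatten

-- ===== PORT B =====
-- _format_subnotes: join of a per-element comprehension
def pvFsubB (subs : List (List Char)) : List Char :=
  (subs.map (fun s =>
    if PySem.Chars.startswith s ['\t', '-'] then s
    else '\t' :: '-' :: ' ' :: s ++ ['\n'])).flatten

-- B's single pass: copy lines; at the first header match absorb the '\t-' run and emit the block; carry the found flag
def pvBLoop (header : List Char) (subs : List (List Char)) :
    List (List Char) → List (List Char) × Bool
  | [] => ([], false)
  | l :: rest =>
    if l = header then
      (l :: pvFsubB (rest.takeWhile (fun s => PySem.Chars.startswith s ['\t', '-']) ++ subs)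
         :: rest.dropWhile (fun s => PySem.Chars.startswith s ['\t', '-']), true)
    else
      let r := pvBLoop header subs rest
      (l :: r.1, r.2)

def update_and_format_file_alt (contents : String) (note : String) (subnotes : List String) : String :=
  let header := '#' :: ' ' :: note.toList ++ ['\n']
  let lines := pvSplitKeep contents.toList []
  let r := pvBLoop header (subnotes.map (·.toList)) lines
  if r.2 then String.ofList r.1.flatten
  else String.ofList ((r.1 ++ [header ++ pvFsubB (subnotes.map (·.toList))]).flatten)

-- ===== PRECONDITION & SPEC =====
def Spec_update_and_format_file (contents : String) (note : String) (subnotes : List String) (out : String) : Prop := out = update_and_format_file_alt contents note subnotes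
instance (contents : String) (note : String) (subnotes : List String) (out : String) : Decidable (Spec_update_and_format_file contents note subnotes out) := by unfold Spec_update_and_format_file; infer_instance

-- ===== CLAIM (what is proved, stated in full; the proofs are below) =====
def Claim_equal_update_and_format_file : Prop := ∀ (contents : String) (note : String) (subnotes : List String), Dom_update_and_format_file contents note subnotes → Spec_update_and_format_file contents note subnotes (update_and_format_file contents note subnotes)

-- ===== LEMMAS AND PROOFS =====

theorem pvFsub_eq (subs : List (List Char)) : pvFsubB subs = pvFsubA subs := by
  unfold pvFsubA pvFsubB
  rcases subs with _ | ⟨x, xs⟩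
  · simp
  · rw [if_neg (List.cons_ne_nil x xs)]
    have hf : (fun (acc s : List Char) =>
        if PySem.Chars.startswith s ['\t', '-'] then acc ++ s
        else acc ++ ('\t' :: '-' :: ' ' :: s) ++ ['\n']) =
        fun acc s => acc ++ (if PySem.Chars.startswith s ['\t', '-'] then s
          else '\t' :: '-' :: ' ' :: s ++ ['\n']) := by
      funext acc s; split <;> simp
    rw [hf, PySem.List.foldl_append_eq_flatMap]
    simp [List.flatMap_def]

theorem pvGni_not_mem (lines : List (List Char)) (header : List Char) (i : Nat)
    (h : header ∉ lines) : pvGniA lines header i = -1 := by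
  induction lines generalizing i with
  | nil => rfl
  | cons l rest ih =>
    simp only [List.mem_cons, not_or] at h
    simp only [pvGniA, if_neg (Ne.symm h.1)]
    exact ih _ h.2

theorem pvGni_split (pre post : List (List Char)) (header : List Char) (i : Nat)
    (h : header ∉ pre) : pvGniA (pre ++ header :: post) header i = (i : Int) + pre.length := by
  induction pre generalizing i with
  | nil => simp [pvGniA]
  | cons l rest ih =>
    simp only [List.mem_cons, not_or] at h
    simp only [List.cons_append, pvGniA, if_neg (Ne.symm h.1), ih _ h.2]
    simp only [List.length_cons]; push_cast; ring

theorem pvGes_zero (ls : List (List Char)) (acc : List (List Char)) :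
    pvGesA ls 0 acc =
      (acc ++ ls.takeWhile (fun s => PySem.Chars.startswith s ['\t', '-']),
       ls.dropWhile (fun s => PySem.Chars.startswith s ['\t', '-'])) := by
  induction ls generalizing acc with
  | nil => unfold pvGesA; simp
  | cons x t ih =>
    unfold pvGesA
    by_cases hx : PySem.Chars.startswith x ['\t', '-'] = true
    · simp [hx, ih]
    · simp [hx]

theorem pvGes_shift (ls : List (List Char)) (x : List Char) (idx : Nat) (acc : List (List Char)) :
    pvGesA (x :: ls) (idx + 1) acc =
      ((pvGesA ls idx acc).1, x :: (pvGesA ls idx acc).2) := by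
  fun_induction pvGesA ls idx acc with
  | case1 a b c d e =>
    conv_lhs => rw [pvGesA]
    simp only [List.length_cons, Nat.add_lt_add_iff_right, List.getElem_cons_succ,
      List.eraseIdx_cons_succ, c, d, dite_true, if_true]
    exact e
  | case2 a b c d =>
    conv_lhs => rw [pvGesA]
    simp [c, d]
  | case3 a b c =>
    conv_lhs => rw [pvGesA]
    simp [c]

theorem pvGes_prefix (pre post : List (List Char)) (acc : List (List Char)) :
    pvGesA (pre ++ post) pre.length acc =
      ((pvGesA post 0 acc).1, pre ++ (pvGesA post 0 acc).2) := by
  induction pre with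
  | nil => simp
  | cons x t ih => simp [pvGes_shift, ih]

theorem pvBLoop_not_mem (header : List Char) (subs : List (List Char)) (ls : List (List Char))
    (h : header ∉ ls) : pvBLoop header subs ls = (ls, false) := by
  induction ls with
  | nil => rfl
  | cons l rest ih =>
    simp only [List.mem_cons, not_or] at h
    simp [pvBLoop, Ne.symm h.1, ih h.2]

theorem pvBLoop_split (header : List Char) (subs : List (List Char))
    (pre post : List (List Char)) (h : header ∉ pre) :
    pvBLoop header subs (pre ++ header :: post) =
      (pre ++ header
        :: pvFsubB (post.takeWhile (fun s => PySem.Chars.startswith s ['\t', '-']) ++ subs)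
        :: post.dropWhile (fun s => PySem.Chars.startswith s ['\t', '-']), true) := by
  induction pre with
  | nil => simp [pvBLoop]
  | cons l rest ih =>
    simp only [List.mem_cons, not_or] at h
    simp [pvBLoop, Ne.symm h.1, ih h.2]

-- first-occurrence decomposition
theorem pvFirstSplit {α : Type} [DecidableEq α] (a : α) (l : List α) (h : a ∈ l) :
    ∃ pre post, l = pre ++ a :: post ∧ a ∉ pre := by
  induction l with
  | nil => cases h
  | cons x xs ih =>
    by_cases hx : x = a
    · exact ⟨[], xs, by simp [hx], by simp⟩
    · have h' : a ∈ xs := by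
        rcases List.mem_cons.mp h with h1 | h1
        · exact absurd h1.symm hx
        · exact h1
      rcases ih h' with ⟨p, q, rfl, hp⟩
      exact ⟨x :: p, q, rfl, by simp [hp]; exact fun hh => hx hh.symm⟩

theorem pvCore (lines : List (List Char)) (note : String) (subnotes : List String) :
    (let ni := pvGniA lines ('#' :: ' ' :: note.toList ++ ['\n']) 0
     let lines1 :=
       if 0 ≤ ni then
         let p := pvGesA lines (ni.toNat + 1) []
         let existing := subnotes.foldl (fun acc s => acc ++ [s.toList]) p.1
         PySem.List.insert p.2 (ni + 1) (pvFsubA existing)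
       else lines
     let lines2 :=
       if ni = -1 then
         lines1 ++ [pvFnoteA note.toList (pvFsubA (subnotes.map (·.toList)))]
       else lines1
     String.ofList lines2.flatten) =
    (let r := pvBLoop ('#' :: ' ' :: note.toList ++ ['\n']) (subnotes.map (·.toList)) lines
     if r.2 then String.ofList r.1.flatten
     else String.ofList
       ((r.1 ++ [('#' :: ' ' :: note.toList ++ ['\n']) ++ pvFsubB (subnotes.map (·.toList))]).flatten)) := by
  dsimp only
  set header := '#' :: ' ' :: note.toList ++ ['\n'] with hh
  by_cases hmem : header ∈ lines
  · rcases pvFirstSplit header lines hmem with ⟨pre, post, hsplit, hpre⟩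
    subst hsplit
    rw [pvGni_split pre post header 0 hpre,
        pvBLoop_split header (subnotes.map (·.toList)) pre post hpre]
    simp only [Nat.cast_zero, zero_add]
    have hge : 0 ≤ (pre.length : Int) := Int.natCast_nonneg _
    have hne : ¬((pre.length : Int) = -1) := by omega
    rw [if_neg hne, if_pos hge]
    have h2 : ((pre.length : Int)).toNat + 1 = (pre ++ [header]).length := by simp
    rw [h2]
    have h3 : pre ++ header :: post = (pre ++ [header]) ++ post := by simp
    rw [h3, pvGes_prefix (pre ++ [header]) post [], pvGes_zero]
    rw [PySem.List.foldl_append_singleton_eq_map]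
    have hlen : (pre.length : Int) + 1 = ((pre.length + 1 : Nat) : Int) := by push_cast; ring
    rw [hlen, PySem.List.insert_natCast _ _ _ (by simp)]
    simp only [if_true]
    refine congrArg String.ofList ?_
    have hre : pre ++ [header] ++ List.dropWhile (fun s => PySem.Chars.startswith s ['\t', '-']) post
        = (pre ++ [header]) ++ List.dropWhile (fun s => PySem.Chars.startswith s ['\t', '-']) post := by
      simp
    rw [hre, List.take_left' (by simp), List.drop_left' (by simp)]
    simp [pvFsub_eq]
  · rw [pvGni_not_mem _ _ _ hmem, pvBLoop_not_mem _ _ _ hmem]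
    rw [if_pos rfl, if_neg (by norm_num : ¬(0:Int) ≤ -1)]
    simp only [Bool.false_eq_true, if_false]
    refine congrArg String.ofList ?_
    simp [pvFnoteA, pvFsub_eq, hh]

-- ===== VERDICT (by name: the statement is the Claim_ definition above) =====
theorem update_and_format_file_spec : Claim_equal_update_and_format_file := by
  intro contents note subnotes _
  unfold Spec_update_and_format_file update_and_format_file update_and_format_file_alt
  dsimp only
  exact pvCore (pvSplitKeep contents.toList []) note subnotes
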